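-- pv_equiv track=rewrite | github.com/Juana2004/SRC | sistema/compatibilidad.py | edad_es_compatible
-- ===== SOURCE A (Python) =====
-- def edad_es_compatible(edad_donante: int, edad_receptor: int) -> bool:
--     rangos = [
--         ((0, 12), (0, 18)),
--         ((13, 25), (10, 40)),
--         ((26, 40), (15, 55)),
--         ((41, 60), (30, 70)),
--         ((61, 75), (50, 80)),
--         ((76, 120), (60, 120)),
--     ]
--
--     for (min_don, max_don), (min_rec, max_rec) in rangos:
--         if (
--             min_don <= edad_donante <= max_don
--             and min_rec <= edad_receptor <= max_rec
--         ):
--             return True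
--     return False
-- ===== SOURCE B (Python) =====
-- import bisect
--
-- _BOUNDS = [12, 25, 40, 60, 75, 120]
-- _REC = [(0, 18), (10, 40), (15, 55), (30, 70), (50, 80), (60, 120)]
--
--
-- def edad_es_compatible(edad_donante: int, edad_receptor: int) -> bool:
--     if edad_donante < 0 or edad_donante > 120:
--         return False
--     lo, hi = _REC[bisect.bisect_left(_BOUNDS, edad_donante)]
--     return lo <= edad_receptor <= hi
-- ===== Notes on version B (the rewrite author's own statement) =====
-- stated objective: idiomatic
-- what changed: Replaced the linear scan over six range pairs by a guard for donor ages outside 0..120 plus a bisect_left lookup into a precomputed boundary/recipient-range table, since the donor buckets are contiguous and disjoint.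
import Mathlib
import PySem

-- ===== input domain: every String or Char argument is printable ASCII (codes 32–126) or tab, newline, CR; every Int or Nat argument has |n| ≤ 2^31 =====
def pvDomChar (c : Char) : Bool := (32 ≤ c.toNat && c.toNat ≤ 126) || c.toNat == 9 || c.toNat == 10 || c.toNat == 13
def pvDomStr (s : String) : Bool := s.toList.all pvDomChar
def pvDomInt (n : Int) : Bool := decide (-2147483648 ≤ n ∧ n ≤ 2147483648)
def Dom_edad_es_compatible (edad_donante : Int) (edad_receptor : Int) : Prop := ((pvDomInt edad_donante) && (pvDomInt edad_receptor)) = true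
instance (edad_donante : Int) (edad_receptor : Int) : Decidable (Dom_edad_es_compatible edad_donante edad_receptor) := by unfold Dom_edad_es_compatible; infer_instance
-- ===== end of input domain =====

-- B replaces A's linear scan over six range pairs by a guard plus a bisect lookup
-- into a precomputed boundary/recipient table (objective: idiomatic table lookup).

-- ===== PORT A =====
-- the loop 'for (min_don,max_don),(min_rec,max_rec) in rangos: if …: return True / return False'
def pvLoopA (edad_donante edad_receptor : Int) :
    List ((Int × Int) × (Int × Int)) → Bool
  | [] => false
  | ((min_don, max_don), (min_rec, max_rec)) :: rest =>
      if min_don ≤ edad_donante ∧ edad_donante ≤ max_don ∧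
         min_rec ≤ edad_receptor ∧ edad_receptor ≤ max_rec then
        true
      else
        pvLoopA edad_donante edad_receptor rest

def edad_es_compatible (edad_donante : Int) (edad_receptor : Int) : Bool :=
  let rangos : List ((Int × Int) × (Int × Int)) :=
    [ ((0, 12), (0, 18)),
      ((13, 25), (10, 40)),
      ((26, 40), (15, 55)),
      ((41, 60), (30, 70)),
      ((61, 75), (50, 80)),
      ((76, 120), (60, 120)) ]
  pvLoopA edad_donante edad_receptor rangos

-- ===== PORT B =====
def pvBounds : List Int := [12, 25, 40, 60, 75, 120]
def pvRec : List (Int × Int) := [(0, 18), (10, 40), (15, 55), (30, 70), (50, 80), (60, 120)]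

-- bisect.bisect_left on a sorted list: the number of elements strictly below x
def pvBisectLeft (xs : List Int) (x : Int) : Int :=
  ((xs.takeWhile (fun b => b < x)).length : Int)

def edad_es_compatible_alt (edad_donante : Int) (edad_receptor : Int) : Bool :=
  if edad_donante < 0 ∨ edad_donante > 120 then
    false
  else
    match PySem.List.pyGet? pvRec (pvBisectLeft pvBounds edad_donante) with
    | some (lo, hi) => decide (lo ≤ edad_receptor) && decide (edad_receptor ≤ hi)
    | none => false

-- ===== PRECONDITION & SPEC =====
def Spec_edad_es_compatible (edad_donante : Int) (edad_receptor : Int) (out : Bool) : Prop := out = edad_es_compatible_alt edad_donante edad_receptor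
instance (edad_donante : Int) (edad_receptor : Int) (out : Bool) : Decidable (Spec_edad_es_compatible edad_donante edad_receptor out) := by unfold Spec_edad_es_compatible; infer_instance

-- ===== CLAIM (what is proved, stated in full; the proofs are below) =====
def Claim_equal_edad_es_compatible : Prop := ∀ (edad_donante : Int) (edad_receptor : Int), Dom_edad_es_compatible edad_donante edad_receptor → Spec_edad_es_compatible edad_donante edad_receptor (edad_es_compatible edad_donante edad_receptor)

-- ===== LEMMAS AND PROOFS =====
theorem pv_equal (d r : Int) :
    edad_es_compatible d r = edad_es_compatible_alt d r := by
  unfold edad_es_compatible edad_es_compatible_alt pvLoopA pvBisectLeft pvBounds pvRec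
  simp only [List.takeWhile]
  have hc : d < 0 ∨ (0 ≤ d ∧ d ≤ 12) ∨ (13 ≤ d ∧ d ≤ 25) ∨ (26 ≤ d ∧ d ≤ 40) ∨ (41 ≤ d ∧ d ≤ 60) ∨ (61 ≤ d ∧ d ≤ 75) ∨ (76 ≤ d ∧ d ≤ 120) ∨ 120 < d := by omega
  rcases hc with h|h|h|h|h|h|h|h
  · simp [pvLoopA, PySem.List.pyGet?, PySem.List.pyIdx?,
      show ¬(0 ≤ d) by omega,
      show ¬(13 ≤ d) by omega,
      show ¬(26 ≤ d) by omega,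
      show ¬(41 ≤ d) by omega,
      show ¬(61 ≤ d) by omega,
      show ¬(76 ≤ d) by omega]
  · simp [pvLoopA, PySem.List.pyGet?, PySem.List.pyIdx?,
      show ¬(d < 0 ∨ d > 120) by omega,
      show 0 ≤ d by omega,
      show d ≤ 12 by omega,
      show ¬(13 ≤ d) by omega,
      show d ≤ 25 by omega,
      show ¬(26 ≤ d) by omega,
      show d ≤ 40 by omega,
      show ¬(41 ≤ d) by omega,
      show d ≤ 60 by omega,
      show ¬(61 ≤ d) by omega,
      show d ≤ 75 by omega,
      show ¬(76 ≤ d) by omega,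
      show d ≤ 120 by omega,
      show ¬(12 < d) by omega,
      show ¬(25 < d) by omega,
      show ¬(40 < d) by omega,
      show ¬(60 < d) by omega,
      show ¬(75 < d) by omega,
      show ¬(120 < d) by omega]
  · simp [pvLoopA, PySem.List.pyGet?, PySem.List.pyIdx?,
      show ¬(d < 0 ∨ d > 120) by omega,
      show 0 ≤ d by omega,
      show ¬(d ≤ 12) by omega,
      show 13 ≤ d by omega,
      show d ≤ 25 by omega,
      show ¬(26 ≤ d) by omega,
      show d ≤ 40 by omega,
      show ¬(41 ≤ d) by omega,
      show d ≤ 60 by omega,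
      show ¬(61 ≤ d) by omega,
      show d ≤ 75 by omega,
      show ¬(76 ≤ d) by omega,
      show d ≤ 120 by omega,
      show 12 < d by omega,
      show ¬(25 < d) by omega,
      show ¬(40 < d) by omega,
      show ¬(60 < d) by omega,
      show ¬(75 < d) by omega,
      show ¬(120 < d) by omega]
  · simp [pvLoopA, PySem.List.pyGet?, PySem.List.pyIdx?,
      show ¬(d < 0 ∨ d > 120) by omega,
      show 0 ≤ d by omega,
      show ¬(d ≤ 12) by omega,
      show 13 ≤ d by omega,
      show ¬(d ≤ 25) by omega,
      show 26 ≤ d by omega,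
      show d ≤ 40 by omega,
      show ¬(41 ≤ d) by omega,
      show d ≤ 60 by omega,
      show ¬(61 ≤ d) by omega,
      show d ≤ 75 by omega,
      show ¬(76 ≤ d) by omega,
      show d ≤ 120 by omega,
      show 12 < d by omega,
      show 25 < d by omega,
      show ¬(40 < d) by omega,
      show ¬(60 < d) by omega,
      show ¬(75 < d) by omega,
      show ¬(120 < d) by omega]
  · simp [pvLoopA, PySem.List.pyGet?, PySem.List.pyIdx?,
      show ¬(d < 0 ∨ d > 120) by omega,
      show 0 ≤ d by omega,
      show ¬(d ≤ 12) by omega,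
      show 13 ≤ d by omega,
      show ¬(d ≤ 25) by omega,
      show 26 ≤ d by omega,
      show ¬(d ≤ 40) by omega,
      show 41 ≤ d by omega,
      show d ≤ 60 by omega,
      show ¬(61 ≤ d) by omega,
      show d ≤ 75 by omega,
      show ¬(76 ≤ d) by omega,
      show d ≤ 120 by omega,
      show 12 < d by omega,
      show 25 < d by omega,
      show 40 < d by omega,
      show ¬(60 < d) by omega,
      show ¬(75 < d) by omega,
      show ¬(120 < d) by omega]
  · simp [pvLoopA, PySem.List.pyGet?, PySem.List.pyIdx?,
      show ¬(d < 0 ∨ d > 120) by omega,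
      show 0 ≤ d by omega,
      show ¬(d ≤ 12) by omega,
      show 13 ≤ d by omega,
      show ¬(d ≤ 25) by omega,
      show 26 ≤ d by omega,
      show ¬(d ≤ 40) by omega,
      show 41 ≤ d by omega,
      show ¬(d ≤ 60) by omega,
      show 61 ≤ d by omega,
      show d ≤ 75 by omega,
      show ¬(76 ≤ d) by omega,
      show d ≤ 120 by omega,
      show 12 < d by omega,
      show 25 < d by omega,
      show 40 < d by omega,
      show 60 < d by omega,
      show ¬(75 < d) by omega,
      show ¬(120 < d) by omega]
  · simp [pvLoopA, PySem.List.pyGet?, PySem.List.pyIdx?,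
      show ¬(d < 0 ∨ d > 120) by omega,
      show 0 ≤ d by omega,
      show ¬(d ≤ 12) by omega,
      show 13 ≤ d by omega,
      show ¬(d ≤ 25) by omega,
      show 26 ≤ d by omega,
      show ¬(d ≤ 40) by omega,
      show 41 ≤ d by omega,
      show ¬(d ≤ 60) by omega,
      show 61 ≤ d by omega,
      show ¬(d ≤ 75) by omega,
      show 76 ≤ d by omega,
      show d ≤ 120 by omega,
      show 12 < d by omega,
      show 25 < d by omega,
      show 40 < d by omega,
      show 60 < d by omega,
      show 75 < d by omega,
      show ¬(120 < d) by omega]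
  · simp [pvLoopA, PySem.List.pyGet?, PySem.List.pyIdx?,
      show (d < 0 ∨ d > 120) by omega,
      show ¬(d ≤ 12) by omega,
      show ¬(d ≤ 25) by omega,
      show ¬(d ≤ 40) by omega,
      show ¬(d ≤ 60) by omega,
      show ¬(d ≤ 75) by omega,
      show ¬(d ≤ 120) by omega]

-- ===== VERDICT (by name: the statement is the Claim_ definition above) =====
theorem edad_es_compatible_spec : Claim_equal_edad_es_compatible := by
  intro d r _
  unfold Spec_edad_es_compatible
  exact pv_equal d r
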